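-- pv_equiv track=rewrite | github.com/radicallycandid/radicallycandid.github.io | build.py | _convert_tables
-- ===== SOURCE A (Python) =====
-- def _convert_tables(content: str) -> str:
--     """Convert markdown tables to HTML tables."""
--     lines = content.split("\n")
--     result: list[str] = []
--     in_table = False
--     table_rows: list[str] = []
--
--     for line in lines:
--         stripped = line.strip()
--         if stripped.startswith("|") and stripped.endswith("|"):
--             if not in_table:
--                 in_table = True
--             table_rows.append(stripped)
--         else:
--             if in_table:
--                 result.append(_render_table(table_rows))
--                 table_rows = []
--                 in_table = False
--             result.append(line)
--
--     if in_table: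
--         result.append(_render_table(table_rows))
--
--     return "\n".join(result)
--
-- def _render_table(rows: list[str]) -> str:
--     """Render table rows as HTML."""
--     if len(rows) < 2:
--         return "\n".join(rows)
--
--     html = ["<table>"]
--
--     # First row is header
--     header_cells = [cell.strip() for cell in rows[0].split("|")[1:-1]]
--     html.append("<thead><tr>")
--     for cell in header_cells:
--         html.append(f"<th>{cell}</th>")
--     html.append("</tr></thead>")
--
--     # Skip separator row, remaining rows are body
--     html.append("<tbody>")
--     for row in rows[2:]:
--         cells = [cell.strip() for cell in row.split("|")[1:-1]]
--         html.append("<tr>")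
--         for cell in cells:
--             html.append(f"<td>{cell}</td>")
--         html.append("</tr>")
--     html.append("</tbody>")
--
--     html.append("</table>")
--     return "\n".join(html)
-- ===== SOURCE B (Python) =====
-- def _convert_tables(content: str) -> str:
--     """Convert markdown tables to HTML tables (staged boundary-index formulation)."""
--     lines = content.split("\n")
--     n = len(lines)
--     flags = [_is_table(line) for line in lines]
--     cuts = [0] + [i for i, (x, y) in enumerate(zip(flags, flags[1:]), 1) if x != y] + [n]
--     parts = []
--     for a, b in zip(cuts, cuts[1:]):
--         if flags[a]:
--             parts.append(_render_block([line.strip() for line in lines[a:b]]))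
--         else:
--             parts.extend(lines[a:b])
--     return "\n".join(parts)
--
--
-- def _is_table(line: str) -> bool:
--     s = line.strip()
--     return s.startswith("|") and s.endswith("|")
--
--
-- def _cells(row: str) -> list:
--     return [c.strip() for c in row.split("|")[1:-1]]
--
--
-- def _render_block(rows: list) -> str:
--     if len(rows) < 2:
--         return "\n".join(rows)
--     header = "\n".join(
--         ["<thead><tr>", *(f"<th>{c}</th>" for c in _cells(rows[0])), "</tr></thead>"])
--     body = "\n".join(
--         ["<tbody>",
--          *("\n".join(["<tr>", *(f"<td>{c}</td>" for c in _cells(r)), "</tr>"]) for r in rows[2:]),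
--          "</tbody>"])
--     return "\n".join(["<table>", header, body, "</table>"])
-- ===== Notes on version B (the rewrite author's own statement) =====
-- stated objective: alternative
-- what changed: Replaces A's single-pass in_table flag + table_rows accumulator state machine by staged passes: a per-line flag list, block boundaries computed by comparing adjacent flags, and each block sliced out by its boundary index pair; the table HTML is built by nested joins instead of one flat accumulator list.
import Mathlib
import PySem

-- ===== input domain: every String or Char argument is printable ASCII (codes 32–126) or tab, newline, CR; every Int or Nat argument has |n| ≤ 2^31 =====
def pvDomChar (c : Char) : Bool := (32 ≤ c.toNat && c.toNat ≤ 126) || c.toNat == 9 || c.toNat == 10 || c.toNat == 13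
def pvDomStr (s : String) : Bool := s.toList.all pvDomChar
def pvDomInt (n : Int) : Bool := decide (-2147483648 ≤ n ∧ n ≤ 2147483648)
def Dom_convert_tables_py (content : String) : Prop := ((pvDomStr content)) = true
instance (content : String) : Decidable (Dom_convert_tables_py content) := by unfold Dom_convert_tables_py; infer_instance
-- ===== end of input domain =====

-- B replaces A's in_table flag/accumulator state machine by staged passes: a per-line flag
-- list, block boundaries found by comparing adjacent flags, and index-pair slicing of each
-- block, with the HTML built by nested joins; alternative decomposition, same cost.


-- ===== PORT A =====
-- [cell.strip() for cell in row.split("|")[1:-1]]   ("|" ≠ "", so split? is some)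
def pvCells (row : String) : List String :=
  (PySem.List.slice ((PySem.Str.split? row "|").getD []) (some 1) (some (-1))).map PySem.Str.strip

-- _render_table: guard len<2, else header from rows[0], skip rows[1], body from rows[2:]
def render_table (rows : List String) : String :=
  match rows with
  | r0 :: _r1 :: body =>
      PySem.Str.join "\n"
        ("<table>" :: "<thead><tr>" ::
          ((pvCells r0).map (fun c => "<th>" ++ c ++ "</th>") ++
           ["</tr></thead>", "<tbody>"] ++
           (body.flatMap (fun r => "<tr>" :: ((pvCells r).map (fun c => "<td>" ++ c ++ "</td>") ++ ["</tr>"]))) ++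
           ["</tbody>", "</table>"]))
  | _ => PySem.Str.join "\n" rows          -- len(rows) < 2

-- stripped.startswith("|") and stripped.endswith("|")
def pvIsTable (line : String) : Bool :=
  PySem.Str.startswith (PySem.Str.strip line) "|" && PySem.Str.endswith (PySem.Str.strip line) "|"

-- A's for-loop: state (result, in_table, table_rows), with the final flush at [].
def aLoop : List String → List String → Bool → List String → List String
  | [], result, inTable, rows => if inTable then result ++ [render_table rows] else result
  | l :: ls, result, inTable, rows =>
      if pvIsTable l then
        aLoop ls result true (rows ++ [PySem.Str.strip l])
      else
        aLoop ls ((if inTable then result ++ [render_table rows] else result) ++ [l]) false []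

def convert_tables_py (content : String) : String :=
  PySem.Str.join "\n" (aLoop ((PySem.Str.split? content "\n").getD []) [] false [])

-- ===== PORT B =====
-- B's _render_block: nested joins (header block, body block, whole table)
def render_block (rows : List String) : String :=
  match rows with
  | r0 :: _r1 :: body =>
      PySem.Str.join "\n"
        ["<table>",
         PySem.Str.join "\n" ("<thead><tr>" :: ((pvCells r0).map (fun c => "<th>" ++ c ++ "</th>") ++ ["</tr></thead>"])),
         PySem.Str.join "\n" ("<tbody>" :: ((body.map (fun r => PySem.Str.join "\n" ("<tr>" :: ((pvCells r).map (fun c => "<td>" ++ c ++ "</td>") ++ ["</tr>"])))) ++ ["</tbody>"])),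
         "</table>"]
  | _ => PySem.Str.join "\n" rows          -- len(rows) < 2

-- B's staged passes: flags list, cut positions where adjacent flags differ (enumerate(zip(flags,
-- flags[1:]), 1) is ported with Nat indices via zipIdx: every index it yields is ≥ 1), then one
-- block per adjacent pair of cuts, sliced out of `lines`.
-- flags[a] is ported as getD (every cut a with a partner b is < n, so the index is in range).
def bParts (lines : List String) : List String :=
  let n := lines.length
  let flags := lines.map pvIsTable
  let cuts := 0 :: (((flags.zip flags.tail).zipIdx 1).filterMap
      (fun p => if p.1.1 != p.1.2 then some p.2 else none) ++ [n])
  (cuts.zip cuts.tail).foldl (fun acc p =>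
      acc ++ (if flags.getD p.1 false then
        [render_block ((PySem.List.slice lines (some (p.1 : Int)) (some (p.2 : Int))).map PySem.Str.strip)]
      else
        PySem.List.slice lines (some (p.1 : Int)) (some (p.2 : Int)))) []

def convert_tables_py_alt (content : String) : String :=
  PySem.Str.join "\n" (bParts ((PySem.Str.split? content "\n").getD []))

-- ===== PRECONDITION & SPEC =====
def Spec_convert_tables_py (content : String) (out : String) : Prop := out = convert_tables_py_alt content
instance (content : String) (out : String) : Decidable (Spec_convert_tables_py content out) := by unfold Spec_convert_tables_py; infer_instance

-- ===== CLAIM (what is proved, stated in full; the proofs are below) =====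
def Claim_equal_convert_tables_py : Prop := ∀ (content : String), Dom_convert_tables_py content → Spec_convert_tables_py content (convert_tables_py content)

-- ===== LEMMAS AND PROOFS =====

-- proof-side middleman: recursion on maximal runs of table lines
def altGo : List String → List String
  | [] => []
  | l :: ls =>
      if pvIsTable l then
        render_block ((l :: ls.takeWhile pvIsTable).map PySem.Str.strip) :: altGo (ls.dropWhile pvIsTable)
      else
        l :: altGo ls
  termination_by ls => ls.length
  decreasing_by
    · simpa using Nat.lt_succ_of_le (List.length_dropWhile_le pvIsTable ls)
    · simp

-- proof-side: the change positions of a flag list, starting at index i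
def chg : List Bool → Nat → List Nat
  | x :: y :: t, i => (if x != y then [i] else []) ++ chg (y :: t) (i + 1)
  | _, _ => []

-- proof-side: cuts / pairs / per-block contribution, matching bParts
def cutsOf (flags : List Bool) : List Nat := 0 :: (chg flags 1 ++ [flags.length])

def fB (lines : List String) (flags : List Bool) (p : Nat × Nat) : List String :=
  if flags.getD p.1 false then
    [render_block ((PySem.List.slice lines (some (p.1 : Int)) (some (p.2 : Int))).map PySem.Str.strip)]
  else
    PySem.List.slice lines (some (p.1 : Int)) (some (p.2 : Int))

-- "\n".join over a concatenation / over pre-joined blocks (Chars level)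
theorem pv_join_append (sep : List Char) (xs ys : List (List Char)) (hx : xs ≠ []) (hy : ys ≠ []) :
    PySem.Chars.join sep (xs ++ ys) = PySem.Chars.join sep xs ++ sep ++ PySem.Chars.join sep ys := by
  induction xs with
  | nil => exact absurd rfl hx
  | cons p xs ih =>
    cases xs with
    | nil =>
      cases ys with
      | nil => exact absurd rfl hy
      | cons y ys' =>
        simp [PySem.Chars.join_cons_cons, PySem.Chars.join_singleton]
    | cons q rest =>
      have h1 : (p :: q :: rest) ++ ys = p :: ((q :: rest) ++ ys) := rfl
      rw [h1]
      have h2 : (q :: rest) ++ ys = q :: (rest ++ ys) := rfl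
      rw [h2, PySem.Chars.join_cons_cons, ← h2, ih (by simp), PySem.Chars.join_cons_cons]
      simp

theorem pv_join_flatMap {α : Type} (sep : List Char) (f : α → List (List Char)) (blocks : List α)
    (hne : ∀ b ∈ blocks, f b ≠ []) :
    PySem.Chars.join sep (blocks.flatMap f) =
      PySem.Chars.join sep (blocks.map (fun b => PySem.Chars.join sep (f b))) := by
  induction blocks with
  | nil => simp
  | cons b bs ih =>
    cases bs with
    | nil => simp [PySem.Chars.join_singleton]
    | cons b' bs' =>
      have hfb : f b ≠ [] := hne b (by simp)
      have hrest : (b' :: bs').flatMap f ≠ [] := by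
        have : f b' ≠ [] := hne b' (by simp)
        simp only [List.flatMap_cons]
        intro h
        exact this (List.append_eq_nil_iff.mp h).1
      rw [List.flatMap_cons, pv_join_append sep _ _ hfb hrest,
          ih (fun x hx => hne x (by simp [hx]))]
      simp only [List.map_cons]
      rw [PySem.Chars.join_cons_cons]

-- equation lemmas for the well-founded altGo
theorem altGo_nil : altGo [] = [] := by rw [altGo]

theorem altGo_cons (l : String) (ls : List String) :
    altGo (l :: ls) =
      if pvIsTable l then
        render_block ((l :: ls.takeWhile pvIsTable).map PySem.Str.strip) :: altGo (ls.dropWhile pvIsTable)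
      else l :: altGo ls := by
  rw [altGo]

-- generic shape of the render equality, at the Chars level
theorem pv_join_key (sep t h a1 a2 a3 a4 : List Char) (ths : List (List Char))
    (f : String → List (List Char)) (body : List String) (hf : ∀ r ∈ body, f r ≠ []) :
    PySem.Chars.join sep (t :: h :: (ths ++ [a1, a2] ++ body.flatMap f ++ [a3, a4])) =
      PySem.Chars.join sep
        [t, PySem.Chars.join sep (h :: (ths ++ [a1])),
         PySem.Chars.join sep (a2 :: (body.map (fun r => PySem.Chars.join sep (f r)) ++ [a3])), a4] := by
  have e1 : t :: h :: (ths ++ [a1, a2] ++ body.flatMap f ++ [a3, a4]) =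
      List.flatMap id [[t], h :: (ths ++ [a1]), a2 :: (body.flatMap f ++ [a3]), [a4]] := by
    simp
  have e2 : a2 :: (body.flatMap f ++ [a3]) =
      List.flatMap id ([[a2]] ++ body.map f ++ [[a3]]) := by
    simp [List.flatMap_def]
  have e3 : PySem.Chars.join sep (a2 :: (body.flatMap f ++ [a3])) =
      PySem.Chars.join sep (a2 :: (body.map (fun r => PySem.Chars.join sep (f r)) ++ [a3])) := by
    rw [e2, pv_join_flatMap sep id _ (by
      rintro b hb
      simp only [List.mem_append, List.mem_singleton, List.mem_map] at hb
      rcases hb with (h' | ⟨r, hr, rfl⟩) | h'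
      · simp [h']
      · exact hf r hr
      · simp [h'])]
    simp [PySem.Chars.join_singleton, List.map_map, Function.comp_def]
  rw [e1, pv_join_flatMap sep id _ (by rintro b hb; fin_cases hb <;> simp)]
  simp only [List.map_cons, List.map_nil, id_eq, PySem.Chars.join_singleton, e3]

-- the two renderers agree
theorem render_eq (rows : List String) : render_table rows = render_block rows := by
  match rows with
  | [] => rfl
  | [r] => rfl
  | r0 :: r1 :: body =>
    rw [render_table, render_block, ← String.toList_inj]
    simp only [PySem.Str.toList_join, List.map_cons, List.map_append, List.map_map,
      List.map_flatMap, List.map_nil, Function.comp_def]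
    exact pv_join_key _ _ _ _ _ _ _ _ _ _ (fun r _ => by simp)

-- loop invariant: A's state machine equals the run recursion
theorem loop_eq (ls : List String) :
    (∀ result, aLoop ls result false [] = result ++ altGo ls) ∧
    (∀ result rows, aLoop ls result true rows =
      result ++ render_block (rows ++ (ls.takeWhile pvIsTable).map PySem.Str.strip) :: altGo (ls.dropWhile pvIsTable)) := by
  induction ls with
  | nil =>
    constructor
    · intro result; simp [aLoop, altGo_nil]
    · intro result rows; simp [aLoop, altGo_nil, render_eq]
  | cons l ls ih =>
    obtain ⟨ih1, ih2⟩ := ih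
    constructor
    · intro result
      by_cases h : pvIsTable l = true
      · rw [aLoop, if_pos h, ih2, altGo_cons, if_pos h]
        simp
      · rw [aLoop, if_neg h, ih1, altGo_cons, if_neg h]
        simp
    · intro result rows
      by_cases h : pvIsTable l = true
      · rw [aLoop, if_pos h, ih2]
        simp [h]
      · rw [aLoop, if_neg h, ih1]
        simp [h, altGo_cons, render_eq]

-- B's filterMap/zipIdx comprehension computes chg
theorem chg_eq (fl : List Bool) (i : Nat) :
    ((fl.zip fl.tail).zipIdx i).filterMap
      (fun p => if p.1.1 != p.1.2 then some p.2 else none) = chg fl i := by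
  induction fl generalizing i with
  | nil => rfl
  | cons x fl ih =>
    cases fl with
    | nil => rfl
    | cons y t =>
      simp only [List.tail_cons, List.zip_cons_cons, List.zipIdx_cons, List.filterMap_cons, chg]
      by_cases h : x != y
      · simp only [h, ← ih (i+1)]
        simp
      · simp only [h, ← ih (i+1)]
        simp at h
        simp

-- shifting the start index shifts every change position
theorem chg_add (fl : List Bool) (i k : Nat) :
    chg fl (i + k) = (chg fl i).map (fun x => x + k) := by
  induction fl generalizing i with
  | nil => rfl
  | cons x fl ih =>
    cases fl with
    | nil => rfl
    | cons y t =>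
      show (if x != y then [i+k] else []) ++ chg (y :: t) (i + k + 1) = _
      rw [show i + k + 1 = (i+1) + k by omega, ih (i+1)]
      by_cases h : x != y <;> simp [chg, h]

theorem chg_replicate (k : Nat) (v : Bool) (i : Nat) :
    chg (List.replicate k v) i = [] := by
  induction k generalizing i with
  | zero => rfl
  | succ k ih =>
    cases k with
    | zero => rfl
    | succ m =>
      show chg (v :: v :: List.replicate m v) i = []
      have h2 : chg (v :: List.replicate m v) (i+1) = [] := ih (i+1)
      simp [chg, h2]

-- the change positions of one maximal run followed by a differing flag
theorem chg_run (k : Nat) (v w : Bool) (g : List Bool) (hvw : v ≠ w) (i : Nat) :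
    chg (v :: (List.replicate k v ++ w :: g)) i = (i + k) :: chg (w :: g) (i + k + 1) := by
  induction k generalizing i with
  | zero => simp [chg, bne_iff_ne, hvw]
  | succ m ih =>
    show chg (v :: v :: (List.replicate m v ++ w :: g)) i = _
    rw [show chg (v :: v :: (List.replicate m v ++ w :: g)) i
        = (if v != v then [i] else []) ++ chg (v :: (List.replicate m v ++ w :: g)) (i+1) from rfl]
    rw [ih (i+1), show i + 1 + m = i + (m+1) by omega]
    simp

-- bParts as a flatMap over the cut pairs
theorem bParts_eq_flatMap (lines : List String) :
    bParts lines =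
      ((cutsOf (lines.map pvIsTable)).zip (cutsOf (lines.map pvIsTable)).tail).flatMap
        (fB lines (lines.map pvIsTable)) := by
  unfold bParts cutsOf
  simp only [chg_eq, List.length_map]
  rw [PySem.List.foldl_append_eq_flatMap]
  congr 1

-- a run of non-table lines passes through altGo unchanged
theorem altGo_false_run (run rest : List String) (h : ∀ x ∈ run, pvIsTable x = false) :
    altGo (run ++ rest) = run ++ altGo rest := by
  induction run with
  | nil => simp
  | cons l t ih =>
    rw [List.cons_append, altGo_cons, if_neg (by simp [h l (by simp)]), ih (fun x hx => h x (by simp [hx]))]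
    simp

-- the per-block contribution is translation-invariant past a prefix
theorem fB_shift (run rest : List String) (a b : Nat) :
    fB (run ++ rest) ((run ++ rest).map pvIsTable) (run.length + a, run.length + b) =
      fB rest (rest.map pvIsTable) (a, b) := by
  have hg : ((run ++ rest).map pvIsTable).getD (run.length + a) false
      = (rest.map pvIsTable).getD a false := by
    rw [List.map_append, List.getD_append_right _ _ _ _ (by simp)]
    simp
  have hs : PySem.List.slice (run ++ rest) (some ((run.length + a : Nat) : Int))
      (some ((run.length + b : Nat) : Int)) = PySem.List.slice rest (some (a : Int)) (some (b : Int)) := by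
    rw [PySem.List.slice_natCast, PySem.List.slice_natCast,
        List.drop_length_add_append, show run.length + b - (run.length + a) = b - a by omega]
  unfold fB
  rw [hg, hs]

-- the first block's contribution
theorem fB_head (run rest : List String) (v : Bool) (hne : run ≠ [])
    (hall : ∀ x ∈ run, pvIsTable x = v) :
    fB (run ++ rest) ((run ++ rest).map pvIsTable) (0, run.length) =
      if v then [render_block (run.map PySem.Str.strip)] else run := by
  have hg : ((run ++ rest).map pvIsTable).getD 0 false = v := by
    cases run with
    | nil => exact absurd rfl hne
    | cons l t => simp [hall l (by simp)]
  have hs : PySem.List.slice (run ++ rest) (some ((0 : Nat) : Int))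
      (some ((run.length : Nat) : Int)) = run := by
    rw [PySem.List.slice_natCast]
    simp
  unfold fB
  rw [hg]
  simp only [Nat.cast_zero] at hs ⊢
  rw [hs]

theorem cuts_decomp (run rest : List String) (v : Bool) (hne : run ≠ [])
    (hall : ∀ x ∈ run, pvIsTable x = v)
    (hrest : rest ≠ []) (hhead : pvIsTable (rest.head hrest) ≠ v) :
    cutsOf ((run ++ rest).map pvIsTable) =
      0 :: (cutsOf (rest.map pvIsTable)).map (· + run.length) := by
  obtain ⟨l, run', rfl⟩ : ∃ l r', run = l :: r' := by
    cases run with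
    | nil => exact absurd rfl hne
    | cons l r' => exact ⟨l, r', rfl⟩
  obtain ⟨w, g, rfl⟩ : ∃ w g, rest = w :: g := by
    cases rest with
    | nil => exact absurd rfl hrest
    | cons w g => exact ⟨w, g, rfl⟩
  have hrep : run'.map pvIsTable = List.replicate run'.length v :=
    List.eq_replicate_iff.mpr ⟨by simp, by
      intro b hb
      simp only [List.mem_map] at hb
      obtain ⟨x, hx, rfl⟩ := hb
      exact hall x (by simp [hx])⟩
  have hl : pvIsTable l = v := hall l (by simp)
  have hflags : ((l :: run') ++ w :: g).map pvIsTable =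
      v :: (List.replicate run'.length v ++ pvIsTable w :: g.map pvIsTable) := by
    simp [hl, hrep]
  have hw : v ≠ pvIsTable w := fun h => hhead (by simp [← h])
  have hch : chg (pvIsTable w :: g.map pvIsTable) (1 + run'.length + 1)
      = (chg ((w :: g).map pvIsTable) 1).map (· + (run'.length + 1)) := by
    rw [show 1 + run'.length + 1 = 1 + (run'.length + 1) by omega, chg_add]
    simp
  rw [cutsOf, hflags, chg_run run'.length v (pvIsTable w) (g.map pvIsTable) hw 1, hch, cutsOf]
  simp
  constructor
  · omega
  · omega

theorem cuts_single (run : List String) (v : Bool) (hall : ∀ x ∈ run, pvIsTable x = v) :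
    cutsOf (run.map pvIsTable) = [0, run.length] := by
  have hrep : run.map pvIsTable = List.replicate run.length v :=
    List.eq_replicate_iff.mpr ⟨by simp, by
      intro b hb
      simp only [List.mem_map] at hb
      obtain ⟨x, hx, rfl⟩ := hb
      exact hall x hx⟩
  rw [cutsOf, hrep, chg_replicate]
  simp

theorem fB_whole (run : List String) (v : Bool) (hne : run ≠ [])
    (hall : ∀ x ∈ run, pvIsTable x = v) :
    fB run (run.map pvIsTable) (0, run.length) =
      if v then [render_block (run.map PySem.Str.strip)] else run := by
  have h := fB_head run [] v hne hall
  simpa using h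

theorem zip_pairs_shift (k : Nat) (c : List Nat) :
    ((0 :: (0 :: c).map (· + k)).zip ((0 :: c).map (· + k))) =
      (0, k) :: ((0 :: c).zip c).map (Prod.map (· + k) (· + k)) := by
  have h : (0 :: c).map (· + k) = k :: c.map (· + k) := by simp
  rw [h, List.zip_cons_cons, ← h, List.zip_map]

-- the main equality, by strong induction on maximal runs
set_option maxHeartbeats 1000000 in
theorem bParts_eq_altGo_aux : ∀ (n : Nat) (ls : List String), ls.length ≤ n → bParts ls = altGo ls := by
  intro n
  induction n with
  | zero =>
    intro ls h
    have : ls = [] := List.length_eq_zero_iff.mp (Nat.le_zero.mp h)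
    subst this
    rw [altGo_nil]; rfl
  | succ n ih =>
    intro ls hlen
    cases ls with
    | nil => rw [altGo_nil]; rfl
    | cons l t =>
      have hsplit : l :: t =
          (l :: t.takeWhile (fun x => pvIsTable x == pvIsTable l)) ++
            t.dropWhile (fun x => pvIsTable x == pvIsTable l) := by
        simp [List.takeWhile_append_dropWhile]
      have hall : ∀ x ∈ l :: t.takeWhile (fun x => pvIsTable x == pvIsTable l),
          pvIsTable x = pvIsTable l := by
        intro x hx
        rcases List.mem_cons.mp hx with h | h
        · rw [h]
        · exact beq_iff_eq.mp
            (List.mem_takeWhile_imp (l := t) (p := fun x => pvIsTable x == pvIsTable l) h)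
      have hrestlen : (t.dropWhile (fun x => pvIsTable x == pvIsTable l)).length ≤ n := by
        have := List.length_dropWhile_le (fun x => pvIsTable x == pvIsTable l) t
        simp at hlen; omega
      have hihrest := ih _ hrestlen
      rw [hsplit, bParts_eq_flatMap]
      cases hr : t.dropWhile (fun x => pvIsTable x == pvIsTable l) with
      | nil =>
        simp only [List.append_nil] at *
        rw [cuts_single _ (pvIsTable l) hall]
        simp only [List.zip_cons_cons, List.tail_cons, List.zip_nil_right, List.flatMap_cons,
          List.flatMap_nil, List.append_nil]
        rw [fB_whole _ (pvIsTable l) (by simp) hall]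
        cases hv : pvIsTable l with
        | true =>
          rw [hv] at hall
          have ht : (t.takeWhile (fun x => pvIsTable x == true)).takeWhile pvIsTable =
              t.takeWhile (fun x => pvIsTable x == true) :=
            List.takeWhile_eq_self_iff.mpr (fun x hx => hall x (List.mem_cons_of_mem _ hx))
          have hd : (t.takeWhile (fun x => pvIsTable x == true)).dropWhile pvIsTable = [] :=
            List.dropWhile_eq_nil_iff.mpr (fun x hx => by simp [hall x (List.mem_cons_of_mem _ hx)])
          rw [if_pos rfl, altGo_cons, if_pos hv, ht, hd, altGo_nil]
        | false =>
          rw [hv] at hall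
          rw [if_neg (by simp)]
          have h2 := altGo_false_run (l :: t.takeWhile (fun x => pvIsTable x == false)) [] hall
          simpa [altGo_nil] using h2.symm
      | cons w g =>
        rw [hr] at hihrest
        have hhead : pvIsTable w ≠ pvIsTable l := by
          have h0 : t.dropWhile (fun x => pvIsTable x == pvIsTable l) ≠ [] := by simp [hr]
          have h1 := List.head_dropWhile_not (fun x => pvIsTable x == pvIsTable l) h0
          rw [show (t.dropWhile (fun x => pvIsTable x == pvIsTable l)).head h0 = w by
            simp [hr]] at h1
          simpa using h1
        rw [cuts_decomp _ (w :: g) (pvIsTable l) (by simp) hall (by simp)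
              (by simpa using hhead),
            List.tail_cons, cutsOf, zip_pairs_shift, List.flatMap_cons, List.flatMap_map]
        have hshift : ∀ p : Nat × Nat,
            fB ((l :: t.takeWhile (fun x => pvIsTable x == pvIsTable l)) ++ w :: g)
              (((l :: t.takeWhile (fun x => pvIsTable x == pvIsTable l)) ++ w :: g).map pvIsTable)
              (Prod.map (· + (l :: t.takeWhile (fun x => pvIsTable x == pvIsTable l)).length)
                (· + (l :: t.takeWhile (fun x => pvIsTable x == pvIsTable l)).length) p) =
            fB (w :: g) ((w :: g).map pvIsTable) p := by
          intro p
          have := fB_shift (l :: t.takeWhile (fun x => pvIsTable x == pvIsTable l)) (w :: g) p.1 p.2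
          simpa [Prod.map, Nat.add_comm] using this
        rw [List.flatMap_congr (fun p _ => hshift p)]
        have hbp : (((0 :: (chg ((w :: g).map pvIsTable) 1 ++ [((w :: g).map pvIsTable).length])).zip
              (chg ((w :: g).map pvIsTable) 1 ++ [((w :: g).map pvIsTable).length])).flatMap
              (fB (w :: g) ((w :: g).map pvIsTable))) = bParts (w :: g) := by
          rw [bParts_eq_flatMap, cutsOf, List.tail_cons]
        rw [hbp, hihrest,
            fB_head (l :: t.takeWhile (fun x => pvIsTable x == pvIsTable l)) (w :: g)
              (pvIsTable l) (by simp) hall]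
        cases hv : pvIsTable l with
        | true =>
          rw [hv] at hall hhead
          have hq : (fun x => pvIsTable x == true) = pvIsTable := by funext x; simp
          rw [hq] at hall
          simp only [hq]
          have hwf : pvIsTable w = false := Bool.eq_false_iff.mpr hhead
          have hts : (t.takeWhile pvIsTable).takeWhile pvIsTable = t.takeWhile pvIsTable :=
            List.takeWhile_eq_self_iff.mpr (fun x hx => hall x (List.mem_cons_of_mem _ hx))
          have hds : (t.takeWhile pvIsTable).dropWhile pvIsTable = [] :=
            List.dropWhile_eq_nil_iff.mpr (fun x hx => hall x (List.mem_cons_of_mem _ hx))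
          have ht : ((t.takeWhile pvIsTable) ++ w :: g).takeWhile pvIsTable =
              t.takeWhile pvIsTable := by
            rw [List.takeWhile_append, if_pos (by rw [hts]),
              List.takeWhile_cons_of_neg (by simp [hwf]), List.append_nil]
          have hd : ((t.takeWhile pvIsTable) ++ w :: g).dropWhile pvIsTable = w :: g := by
            rw [List.dropWhile_append, if_pos (by rw [hds]; rfl),
              List.dropWhile_cons_of_neg (by simp [hwf])]
          rw [if_pos trivial]
          conv_rhs => rw [List.cons_append, altGo_cons]
          rw [if_pos hv, ht, hd, List.singleton_append]
        | false =>
          rw [hv] at hall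
          have h2 := altGo_false_run (l :: t.takeWhile (fun x => pvIsTable x == false)) (w :: g) hall
          simp only [Bool.false_eq_true, if_false]
          simpa using h2.symm

theorem bParts_eq_altGo (ls : List String) : bParts ls = altGo ls :=
  bParts_eq_altGo_aux ls.length ls le_rfl

-- ===== VERDICT (by name: the statement is the Claim_ definition above) =====
theorem convert_tables_py_spec : Claim_equal_convert_tables_py := by
  intro content _
  unfold Spec_convert_tables_py convert_tables_py convert_tables_py_alt
  rw [(loop_eq _).1 [], bParts_eq_altGo]
  simp
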